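-- pv_equiv track=rewrite | github.com/jul-ienfr/P-core | python/src/weather_pm/weather_decision_context.py | _city_from_question
-- ===== SOURCE A (Python) =====
-- def _city_from_question(question: str) -> str | None:
--     marker = " in "
--     lower = question.lower()
--     start = lower.find(marker)
--     if start < 0:
--         return None
--     after = question[start + len(marker) :]
--     end_positions = [pos for token in (" be ", " on ", "?") if (pos := after.lower().find(token)) >= 0]
--     city = after[: min(end_positions) if end_positions else len(after)].strip(" ?.,")
--     return city or None
-- ===== SOURCE B (Python) =====
-- def _city_from_question(question: str) -> str | None:
--     lower = question.lower()
--     start = lower.find(" in ")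
--     if start < 0:
--         return None
--     after = question[start + 4:]
--     al = lower[start + 4:]
--     cut = 0
--     while cut < len(al):
--         if al.startswith(" be ", cut) or al.startswith(" on ", cut) or al[cut] == "?":
--             break
--         cut += 1
--     city = after[:cut].strip(" ?.,")
--     return city or None
-- ===== Notes on version B (the rewrite author's own statement) =====
-- stated objective: alternative
-- what changed: A runs a separate find() over the tail for each of the three terminators, collects the hit positions in a list and takes min(); B makes a single left-to-right scan of the tail that stops at the first position where any terminator starts, and reuses the already-lowered string instead of lowering the tail again.
import Mathlib
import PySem

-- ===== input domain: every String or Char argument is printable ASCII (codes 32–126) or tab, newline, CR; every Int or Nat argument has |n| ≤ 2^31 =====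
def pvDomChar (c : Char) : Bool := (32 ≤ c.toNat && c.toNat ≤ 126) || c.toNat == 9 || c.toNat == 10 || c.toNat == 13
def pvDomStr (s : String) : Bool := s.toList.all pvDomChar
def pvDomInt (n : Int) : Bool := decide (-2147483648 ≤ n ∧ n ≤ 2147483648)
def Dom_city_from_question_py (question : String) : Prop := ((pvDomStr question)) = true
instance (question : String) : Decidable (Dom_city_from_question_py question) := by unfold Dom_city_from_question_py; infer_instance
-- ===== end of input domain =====

-- B replaces A's three whole-string find() passes + position list + min with a single
-- left-to-right scan that stops at the first terminator, reusing the already-lowered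
-- string instead of lowering the tail again (objective: alternative).

def pvBeTok : List Char := [' ', 'b', 'e', ' ']
def pvOnTok : List Char := [' ', 'o', 'n', ' ']
def pvQmTok : List Char := ['?']

-- ===== PORT A =====
-- the comprehension [pos for token in (" be ", " on ", "?") if (pos := after.lower().find(token)) >= 0]
def pvEP (al : List Char) : List Int :=
  [pvBeTok, pvOnTok, pvQmTok].foldl
    (fun acc token =>
      if PySem.Chars.find al token ≥ 0 then acc ++ [PySem.Chars.find al token] else acc) []

def pvACore (q : List Char) : Option (List Char) :=
  let lower := PySem.Chars.lower q
  let start := PySem.Chars.find lower [' ', 'i', 'n', ' ']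
  if start < 0 then none
  else
    let after := PySem.Chars.slice q (some (start + 4)) none
    let endPositions := pvEP (PySem.Chars.lower after)
    let cutoff := match PySem.List.min? endPositions (fun x => x) with
      | some m => m
      | none => (after.length : Int)
    let city := PySem.Chars.stripChars (PySem.Chars.slice after none (some cutoff)) [' ', '?', '.', ',']
    if city = [] then none else some city

def city_from_question_py (question : String) : Option String :=
  (pvACore question.toList).map String.ofList

-- ===== PORT B =====
-- the while loop of Source B: the index over positions of al = structural recursion on the suffix
def pvScanCut : List Char → Nat
  | [] => 0
  | c :: rest =>
    if PySem.Chars.startswith (c :: rest) pvBeTok || PySem.Chars.startswith (c :: rest) pvOnTok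
       || c == '?' then 0
    else pvScanCut rest + 1

def pvBCore (q : List Char) : Option (List Char) :=
  let lower := PySem.Chars.lower q
  let start := PySem.Chars.find lower [' ', 'i', 'n', ' ']
  if start < 0 then none
  else
    let after := PySem.Chars.slice q (some (start + 4)) none
    let al := PySem.Chars.slice lower (some (start + 4)) none
    let city := PySem.Chars.stripChars (after.take (pvScanCut al)) [' ', '?', '.', ',']
    if city = [] then none else some city

def city_from_question_py_alt (question : String) : Option String :=
  (pvBCore question.toList).map String.ofList

-- ===== PRECONDITION & SPEC =====
def Spec_city_from_question_py (question : String) (out : Option String) : Prop := out = city_from_question_py_alt question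
instance (question : String) (out : Option String) : Decidable (Spec_city_from_question_py question out) := by unfold Spec_city_from_question_py; infer_instance

-- ===== CLAIM (what is proved, stated in full; the proofs are below) =====
def Claim_equal_city_from_question_py : Prop := ∀ (question : String), Dom_city_from_question_py question → Spec_city_from_question_py question (city_from_question_py question)

-- ===== LEMMAS AND PROOFS =====

-- a terminator token starts at the head of l
def pvHit (l : List Char) : Prop := pvBeTok <+: l ∨ pvOnTok <+: l ∨ pvQmTok <+: l

theorem pvScanCut_cond (c : Char) (rest : List Char) :
    (PySem.Chars.startswith (c :: rest) pvBeTok || PySem.Chars.startswith (c :: rest) pvOnTok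
       || c == '?') = true ↔ pvHit (c :: rest) := by
  have hq : pvQmTok <+: c :: rest ↔ c = '?' := by
    simp [pvQmTok, List.cons_prefix_cons, eq_comm]
  unfold pvHit
  rw [hq]
  simp only [Bool.or_eq_true, PySem.Chars.startswith_iff, beq_iff_eq]
  tauto

theorem pvMem_pvEP (al : List Char) (p : Int) :
    p ∈ pvEP al ↔ 0 ≤ p ∧ (PySem.Chars.find al pvBeTok = p ∨ PySem.Chars.find al pvOnTok = p
      ∨ PySem.Chars.find al pvQmTok = p) := by
  unfold pvEP
  simp only [List.foldl, ge_iff_le]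
  split_ifs <;> simp <;> omega

theorem pvEP_nil (al : List Char) :
    pvEP al = [] ↔ PySem.Chars.find al pvBeTok < 0 ∧ PySem.Chars.find al pvOnTok < 0
      ∧ PySem.Chars.find al pvQmTok < 0 := by
  unfold pvEP
  simp only [List.foldl, ge_iff_le]
  split_ifs <;> simp <;> omega

theorem pvScanCut_le (al : List Char) : pvScanCut al ≤ al.length := by
  induction al with
  | nil => simp [pvScanCut]
  | cons c rest ih =>
    rw [pvScanCut]
    split
    · simp
    · simp only [List.length_cons]; omega

theorem pvScanCut_not_hit (al : List Char) :
    ∀ j < pvScanCut al, ¬ pvHit (al.drop j) := by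
  induction al with
  | nil => simp [pvScanCut]
  | cons c rest ih =>
    intro j hj
    rw [pvScanCut] at hj
    split at hj
    · omega
    · rename_i hc
      match j with
      | 0 =>
        simp only [List.drop_zero]
        rw [← pvScanCut_cond c rest]
        exact hc
      | j + 1 =>
        simp only [List.drop_succ_cons]
        exact ih j (by omega)

theorem pvScanCut_hit (al : List Char) :
    pvScanCut al < al.length → pvHit (al.drop (pvScanCut al)) := by
  induction al with
  | nil => simp [pvScanCut]
  | cons c rest ih =>
    rw [pvScanCut]
    split
    · rename_i hc
      intro _
      rw [pvScanCut_cond] at hc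
      simpa using hc
    · intro h
      simp only [List.length_cons] at h
      simp only [List.drop_succ_cons]
      exact ih (by omega)

-- a token's find is nonnegative exactly when the token starts at some position
theorem pvNo_hit_iff (al : List Char) (t : List Char) :
    0 ≤ PySem.Chars.find al t ↔ ∃ j, t <+: al.drop j := by
  rw [PySem.Chars.find_nonneg_iff, ← PySem.Chars.isIn_iff_infix,
    ← PySem.Chars.exists_prefix_drop_iff_isIn]

-- A's cutoff (least found terminator position, else the length) is B's scan position
theorem pvCutoff_eq (al : List Char) :
    (match PySem.List.min? (pvEP al) (fun x => x) with
      | some m => m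
      | none => (al.length : Int)) = (pvScanCut al : Int) := by
  cases hmin : PySem.List.min? (pvEP al) (fun x => x) with
  | none =>
    rw [PySem.List.min?_eq_none_iff, pvEP_nil] at hmin
    have hscan : pvScanCut al = al.length := by
      rcases Nat.lt_or_ge (pvScanCut al) al.length with h | h
      · exfalso
        have hh := pvScanCut_hit al h
        unfold pvHit at hh
        rcases hh with hp | hp | hp
        · have : 0 ≤ PySem.Chars.find al pvBeTok := (pvNo_hit_iff al _).2 ⟨_, hp⟩
          omega
        · have : 0 ≤ PySem.Chars.find al pvOnTok := (pvNo_hit_iff al _).2 ⟨_, hp⟩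
          omega
        · have : 0 ≤ PySem.Chars.find al pvQmTok := (pvNo_hit_iff al _).2 ⟨_, hp⟩
          omega
      · exact Nat.le_antisymm (pvScanCut_le al) h
    simp [hscan]
  | some m =>
    have hmem := PySem.List.min?_mem hmin
    rw [pvMem_pvEP] at hmem
    obtain ⟨hm0, hts⟩ := hmem
    -- a token starts at position m.toNat, so the scan cannot pass it
    have hmk : ∀ t : List Char, PySem.Chars.find al t = m → t <+: al.drop m.toNat := by
      intro t h'
      have h0 : 0 ≤ PySem.Chars.find al t := by rw [h']; exact hm0
      have hpre := (PySem.Chars.find_spec h0).1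
      rwa [h'] at hpre
    have hhit : pvHit (al.drop m.toNat) := by
      unfold pvHit
      rcases hts with h' | h' | h'
      · exact Or.inl (hmk _ h')
      · exact Or.inr (Or.inl (hmk _ h'))
      · exact Or.inr (Or.inr (hmk _ h'))
    have hscan_le : pvScanCut al ≤ m.toNat := by
      by_contra hlt
      exact pvScanCut_not_hit al m.toNat (by omega) hhit
    -- and m is the least found position, in particular ≤ the scan position
    have hm_le : m ≤ (pvScanCut al : Int) := by
      rcases Nat.lt_or_ge (pvScanCut al) al.length with h | h
      · have hstep : ∀ t : List Char,
            (PySem.Chars.find al pvBeTok = PySem.Chars.find al t ∨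
             PySem.Chars.find al pvOnTok = PySem.Chars.find al t ∨
             PySem.Chars.find al pvQmTok = PySem.Chars.find al t) →
            t <+: al.drop (pvScanCut al) → m ≤ (pvScanCut al : Int) := by
          intro t htok hp
          have h0 : 0 ≤ PySem.Chars.find al t := (pvNo_hit_iff al t).2 ⟨_, hp⟩
          have hspec := PySem.Chars.find_spec h0
          have hle : (PySem.Chars.find al t).toNat ≤ pvScanCut al := by
            by_contra hgt
            exact hspec.2 (pvScanCut al) (by omega) hp
          have hmle := PySem.List.min?_isMin hmin (PySem.Chars.find al t)
            ((pvMem_pvEP al _).2 ⟨h0, htok⟩)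
          simp only at hmle
          omega
        have hh := pvScanCut_hit al h
        unfold pvHit at hh
        rcases hh with hp | hp | hp
        · exact hstep pvBeTok (Or.inl rfl) hp
        · exact hstep pvOnTok (Or.inr (Or.inl rfl)) hp
        · exact hstep pvQmTok (Or.inr (Or.inr rfl)) hp
      · have hlen := PySem.Chars.find_le_length al pvBeTok
        have hlen2 := PySem.Chars.find_le_length al pvOnTok
        have hlen3 := PySem.Chars.find_le_length al pvQmTok
        have := pvScanCut_le al
        rcases hts with h' | h' | h' <;> omega
    show m = (pvScanCut al : Int)
    omega

theorem pvCore_eq (q : List Char) : pvACore q = pvBCore q := by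
  simp only [pvACore, pvBCore]
  generalize PySem.Chars.find (PySem.Chars.lower q) [' ', 'i', 'n', ' '] = start
  by_cases hs : start < 0
  · simp [hs]
  · simp only [hs, if_false]
    have hs4 : (0:Int) ≤ start + 4 := by omega
    simp only [PySem.Chars.slice_eq_listSlice]
    rw [PySem.List.slice_from q hs4, PySem.List.slice_from (PySem.Chars.lower q) hs4]
    have hmap : PySem.Chars.lower (List.drop (start + 4).toNat q)
        = List.drop (start + 4).toNat (PySem.Chars.lower q) := by
      simp [PySem.Chars.lower, List.map_drop]
    have hlen : (List.drop (start + 4).toNat q).length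
        = (List.drop (start + 4).toNat (PySem.Chars.lower q)).length := by
      simp [PySem.Chars.lower]
    rw [hmap, hlen, pvCutoff_eq (List.drop (start + 4).toNat (PySem.Chars.lower q))]
    rw [PySem.List.slice_to _ (by omega : (0:Int) ≤ (pvScanCut (List.drop (start + 4).toNat (PySem.Chars.lower q)) : Int))]
    simp

-- ===== VERDICT (by name: the statement is the Claim_ definition above) =====
theorem city_from_question_py_spec : Claim_equal_city_from_question_py := by
  intro question _
  unfold Spec_city_from_question_py city_from_question_py city_from_question_py_alt
  rw [pvCore_eq]
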